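-- pv_equiv track=rewrite | github.com/hypergraphman/MukseevTagirEGE24 | task22/крылов23год20вар.py | fn
-- ===== SOURCE A (Python) =====
-- def fn(n):
--     st = '>'+'1'*23+'2'*n+'3'*25
--     while '>1' in st or '>2' in st or '>3' in st:
--         if '>1':
--             st = st.replace('>1', '1>', 1)
--         if '>2':
--             st = st.replace('>2', '>3', 1)
--         if '>3':
--             st = st.replace('>3', '>11', 1)
--     return  st
-- ===== SOURCE B (Python) =====
-- def fn(n):
--     # Closed form: every '2' and every '3' eventually turns into two '1's that the
--     # marker '>' walks past, so the final tape is 23 + 2*n + 2*25 = 73 + 2n ones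
--     # followed by '>' (for n < 0, '2'*n is empty, same as n = 0).
--     return '1' * (73 + 2 * max(n, 0)) + '>'
-- ===== Notes on version B (the rewrite author's own statement) =====
-- stated objective: faster
-- what changed: Replaced the O(n^2) string-rewriting simulation (O(n) loop iterations, each scanning/replacing in an O(n) string) with the closed form '1'*(73+2*max(n,0))+'>' derived from a conservation argument.
import Mathlib
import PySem

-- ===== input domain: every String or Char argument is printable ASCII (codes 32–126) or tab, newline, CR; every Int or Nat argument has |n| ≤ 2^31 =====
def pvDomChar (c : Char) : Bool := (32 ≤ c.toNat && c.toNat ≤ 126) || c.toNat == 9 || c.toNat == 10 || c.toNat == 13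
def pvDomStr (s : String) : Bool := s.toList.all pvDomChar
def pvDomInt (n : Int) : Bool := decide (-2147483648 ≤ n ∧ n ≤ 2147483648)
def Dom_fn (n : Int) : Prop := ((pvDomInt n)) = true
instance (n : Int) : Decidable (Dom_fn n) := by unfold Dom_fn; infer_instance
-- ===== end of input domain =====

-- B replaces A's O(n^2) rewrite-loop simulation by the closed form '1'*(73+2*max(n,0))+'>' (faster).

-- ===== PORT A =====
-- st.replace(old, new, 1): replace the FIRST occurrence; exact for nonempty old
-- (PySem.Chars.find returns the first occurrence, -1 if absent, as Python's str.find).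
def pyReplace1 (s old new : List Char) : List Char :=
  let i := PySem.Chars.find s old
  if i = -1 then s else s.take i.toNat ++ new ++ s.drop (i.toNat + old.length)

-- the while loop; Python's `if '>1':` / `if '>2':` / `if '>3':` test nonempty string
-- LITERALS, hence are always true, so all three replaces run in every iteration.
-- fuel only makes the recursion total; fn passes enough fuel for the loop to finish
-- (proved below: the loop runs at most 3*n.toNat+98 iterations).
def fnLoop : Nat → List Char → List Char
  | 0, st => st
  | fuel+1, st =>
    if PySem.Chars.isIn ['>', '1'] st || PySem.Chars.isIn ['>', '2'] st
        || PySem.Chars.isIn ['>', '3'] st then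
      fnLoop fuel
        (pyReplace1 (pyReplace1 (pyReplace1 st ['>', '1'] ['1', '>'])
          ['>', '2'] ['>', '3']) ['>', '3'] ['>', '1', '1'])
    else st

-- '2'*n is '' for n ≤ 0, hence List.replicate n.toNat '2'
def fn (n : Int) : String :=
  String.ofList (fnLoop (3 * n.toNat + 200)
    ('>' :: (List.replicate 23 '1' ++ List.replicate n.toNat '2' ++ List.replicate 25 '3')))

-- ===== PORT B =====
def fn_alt (n : Int) : String :=
  String.ofList (List.replicate (73 + 2 * max n 0).toNat '1' ++ ['>'])

-- ===== PRECONDITION & SPEC =====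
def Spec_fn (n : Int) (out : String) : Prop := out = fn_alt n
instance (n : Int) (out : String) : Decidable (Spec_fn n out) := by unfold Spec_fn; infer_instance

-- ===== CLAIM (what is proved, stated in full; the proofs are below) =====
def Claim_equal_fn : Prop := ∀ (n : Int), Dom_fn n → Spec_fn n (fn n)

-- ===== LEMMAS AND PROOFS =====

-- tape shape invariant: the string is always 1^a > 1^b 2^c 3^d (proof-side only)
def Rtape (b c d : Nat) : List Char :=
  List.replicate b '1' ++ List.replicate c '2' ++ List.replicate d '3'

def Stape (a b c d : Nat) : List Char :=
  List.replicate a '1' ++ '>' :: Rtape b c d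

-- any occurrence of '>'::t in pre ++ '>'::rest (with '>' in neither part) is AT the marker
lemma prefix_drop_marker {pre rest t : List Char} (hp : '>' ∉ pre) (hr : '>' ∉ rest)
    {i : Nat} (h : ('>' :: t) <+: (pre ++ '>' :: rest).drop i) :
    i = pre.length ∧ t <+: rest := by
  obtain ⟨u, hu⟩ := h
  rcases lt_trichotomy i pre.length with hi | hi | hi
  · exfalso
    rw [List.drop_append_of_le_length (le_of_lt hi),
        List.drop_eq_getElem_cons hi] at hu
    simp only [List.cons_append] at hu
    injection hu with h1 _
    exact hp (h1 ▸ pre.getElem_mem hi)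
  · subst hi
    rw [List.drop_left] at hu
    have : t ++ u = rest := by simpa using hu
    exact ⟨rfl, ⟨u, this⟩⟩
  · exfalso
    obtain ⟨k, rfl⟩ : ∃ k, i = pre.length + (k + 1) := ⟨i - pre.length - 1, by omega⟩
    have hdrop : (pre ++ '>' :: rest).drop (pre.length + (k + 1)) = rest.drop k := by
      simp [List.drop_append]
    rw [hdrop] at hu
    have : '>' ∈ rest.drop k := by rw [← hu]; exact List.mem_cons_self
    exact hr (List.drop_subset k rest this)

lemma isIn_marker (pre rest t : List Char) (hp : '>' ∉ pre) (hr : '>' ∉ rest) :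
    PySem.Chars.isIn ('>' :: t) (pre ++ '>' :: rest) = decide (t <+: rest) := by
  by_cases h : t <+: rest
  · simp only [h, decide_true]
    rw [← PySem.Chars.exists_prefix_drop_iff_isIn]
    exact ⟨pre.length, by rw [List.drop_left]; exact List.cons_prefix_cons.mpr ⟨rfl, h⟩⟩
  · simp only [h, decide_false]
    rw [PySem.Chars.isIn_eq_false_iff]
    intro hinf
    have : ∃ j, ('>' :: t) <+: (pre ++ '>' :: rest).drop j :=
      by rw [PySem.Chars.exists_prefix_drop_iff_isIn, PySem.Chars.isIn_iff_infix]; exact hinf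
    obtain ⟨j, hj⟩ := this
    exact h (prefix_drop_marker hp hr hj).2

lemma find_marker (pre rest t : List Char) (hp : '>' ∉ pre) (hr : '>' ∉ rest) :
    PySem.Chars.find (pre ++ '>' :: rest) ('>' :: t) =
      if t <+: rest then (pre.length : Int) else -1 := by
  by_cases h : t <+: rest
  · simp only [h, if_true]
    have hin : PySem.Chars.isIn ('>' :: t) (pre ++ '>' :: rest) = true := by
      rw [isIn_marker pre rest t hp hr]; simpa using h
    have hnn : 0 ≤ PySem.Chars.find (pre ++ '>' :: rest) ('>' :: t) := by
      rw [PySem.Chars.find_nonneg_iff, ← PySem.Chars.isIn_iff_infix]; exact hin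
    obtain ⟨hpref, _⟩ := PySem.Chars.find_spec hnn
    have := (prefix_drop_marker hp hr hpref).1
    omega
  · simp only [h, if_false]
    rw [PySem.Chars.find_eq_neg_one_iff]
    intro hinf
    obtain ⟨j, hj⟩ := (PySem.Chars.exists_prefix_drop_iff_isIn (s := pre ++ '>' :: rest)
      (sub := '>' :: t)).mpr (by rwa [PySem.Chars.isIn_iff_infix])
    exact h (prefix_drop_marker hp hr hj).2

lemma replace1_marker (pre rest t new : List Char) (hp : '>' ∉ pre) (hr : '>' ∉ rest) :
    pyReplace1 (pre ++ '>' :: rest) ('>' :: t) new =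
      if t <+: rest then pre ++ new ++ rest.drop t.length else pre ++ '>' :: rest := by
  unfold pyReplace1
  rw [find_marker pre rest t hp hr]
  by_cases h : t <+: rest
  · simp only [h, if_true]
    have h1 : ((pre.length : Int) = -1) = False := by simp
    simp only [h1, if_false]
    have h2 : (pre.length : Int).toNat = pre.length := by omega
    rw [h2, List.take_left]
    have h3 : (pre ++ '>' :: rest).drop (pre.length + ('>' :: t).length)
        = rest.drop t.length := by
      simp [List.drop_append, List.length_cons]
    rw [h3]
  · simp [h]

lemma hpre1 (k : Nat) : '>' ∉ List.replicate k '1' := by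
  simp [List.mem_replicate]

lemma hrR (b c d : Nat) : '>' ∉ Rtape b c d := by
  simp [Rtape, List.mem_append, List.mem_replicate]

lemma Rtape_b_succ (B c d : Nat) : Rtape (B + 1) c d = '1' :: Rtape B c d := by
  simp [Rtape, List.replicate_succ]

lemma Rtape_c_succ (C d : Nat) : Rtape 0 (C + 1) d = '2' :: Rtape 0 C d := by
  simp [Rtape, List.replicate_succ]

lemma Rtape_d_succ (D : Nat) : Rtape 0 0 (D + 1) = '3' :: Rtape 0 0 D := by
  simp [Rtape, List.replicate_succ]

lemma Rtape_zero : Rtape 0 0 0 = [] := rfl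

lemma npref_cons {x y : Char} (t L : List Char) (hxy : x ≠ y) : ¬ (x :: t) <+: (y :: L) := by
  rintro ⟨u, hu⟩
  rw [List.cons_append] at hu
  injection hu with h1 _
  exact hxy h1

lemma npref_nil (x : Char) (t : List Char) : ¬ (x :: t) <+: ([] : List Char) := by
  simp

lemma pref_cons (x : Char) (L : List Char) : [x] <+: (x :: L) := ⟨L, rfl⟩

-- the three replaces of one loop iteration, by tape shape ------------------

-- replace('>1','1>',1): the marker steps over a '1'
lemma rep1_pos (a B c d : Nat) :
    pyReplace1 (Stape a (B + 1) c d) ['>', '1'] ['1', '>'] = Stape (a + 1) B c d := by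
  unfold Stape
  rw [replace1_marker _ _ ['1'] _ (hpre1 a) (hrR _ _ _), Rtape_b_succ,
    if_pos (pref_cons '1' _)]
  simp [List.replicate_succ', List.append_assoc]

lemma rep1_zero (a c d : Nat) :
    pyReplace1 (Stape a 0 c d) ['>', '1'] ['1', '>'] = Stape a 0 c d := by
  unfold Stape
  rw [replace1_marker _ _ ['1'] _ (hpre1 a) (hrR _ _ _), if_neg]
  rintro ⟨u, hu⟩
  have : '1' ∈ Rtape 0 c d := by rw [← hu]; exact List.mem_cons_self
  simp [Rtape, List.mem_append, List.mem_replicate] at this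

-- replaces 2 and 3 together, on a tape with no '1' after the marker
lemma tail23_c (a C d : Nat) :
    pyReplace1 (pyReplace1 (Stape a 0 (C + 1) d) ['>', '2'] ['>', '3']) ['>', '3']
      ['>', '1', '1'] = Stape a 2 C d := by
  unfold Stape
  rw [replace1_marker _ _ ['2'] _ (hpre1 a) (hrR _ _ _), Rtape_c_succ,
    if_pos (pref_cons '2' _)]
  have e : List.replicate a '1' ++ ['>', '3'] ++ ('2' :: Rtape 0 C d).drop (['2'] : List Char).length
      = List.replicate a '1' ++ '>' :: ('3' :: Rtape 0 C d) := by simp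
  rw [e, replace1_marker _ _ ['3'] _ (hpre1 a)
    (by simpa using hrR 0 C d), if_pos (pref_cons '3' _)]
  have e2 : ('3' :: Rtape 0 C d).drop (['3'] : List Char).length = Rtape 0 C d := rfl
  rw [e2]
  simp [Rtape, List.replicate_succ]

lemma tail23_d (a D : Nat) :
    pyReplace1 (pyReplace1 (Stape a 0 0 (D + 1)) ['>', '2'] ['>', '3']) ['>', '3']
      ['>', '1', '1'] = Stape a 2 0 D := by
  unfold Stape
  rw [replace1_marker _ _ ['2'] _ (hpre1 a) (hrR _ _ _), Rtape_d_succ,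
    if_neg (npref_cons _ _ (by decide)),
    replace1_marker _ _ ['3'] _ (hpre1 a) (by rw [← Rtape_d_succ]; exact hrR _ _ _),
    if_pos (pref_cons '3' _)]
  have e2 : ('3' :: Rtape 0 0 D).drop (['3'] : List Char).length = Rtape 0 0 D := rfl
  rw [e2]
  simp [Rtape, List.replicate_succ]

lemma tail23_0 (a : Nat) :
    pyReplace1 (pyReplace1 (Stape a 0 0 0) ['>', '2'] ['>', '3']) ['>', '3']
      ['>', '1', '1'] = Stape a 0 0 0 := by
  unfold Stape
  rw [replace1_marker _ _ ['2'] _ (hpre1 a) (hrR _ _ _), Rtape_zero,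
    if_neg (npref_nil _ _),
    replace1_marker _ _ ['3'] _ (hpre1 a) (by rw [← Rtape_zero]; exact hrR 0 0 0),
    if_neg (npref_nil _ _)]

lemma tail23_b (a B c d : Nat) :
    pyReplace1 (pyReplace1 (Stape a (B + 1) c d) ['>', '2'] ['>', '3']) ['>', '3']
      ['>', '1', '1'] = Stape a (B + 1) c d := by
  unfold Stape
  rw [replace1_marker _ _ ['2'] _ (hpre1 a) (hrR _ _ _), Rtape_b_succ,
    if_neg (npref_cons _ _ (by decide)),
    replace1_marker _ _ ['3'] _ (hpre1 a) (by rw [← Rtape_b_succ]; exact hrR _ _ _),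
    if_neg (npref_cons _ _ (by decide))]

-- while-condition value on a tape
lemma cond_marker (a b c d : Nat) :
    (PySem.Chars.isIn ['>', '1'] (Stape a b c d) || PySem.Chars.isIn ['>', '2'] (Stape a b c d)
      || PySem.Chars.isIn ['>', '3'] (Stape a b c d))
    = (decide (['1'] <+: Rtape b c d) || decide (['2'] <+: Rtape b c d)
      || decide (['3'] <+: Rtape b c d)) := by
  unfold Stape
  rw [isIn_marker _ _ ['1'] (hpre1 a) (hrR _ _ _),
    isIn_marker _ _ ['2'] (hpre1 a) (hrR _ _ _),
    isIn_marker _ _ ['3'] (hpre1 a) (hrR _ _ _)]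

lemma loop_S (fuel : Nat) : ∀ a b c d : Nat, b + 3 * c + 3 * d ≤ fuel →
    fnLoop fuel (Stape a b c d) = List.replicate (a + b + 2 * c + 2 * d) '1' ++ ['>'] := by
  induction fuel with
  | zero =>
    intro a b c d h
    have hb : b = 0 := by omega
    have hc : c = 0 := by omega
    have hd : d = 0 := by omega
    subst hb; subst hc; subst hd
    simp [fnLoop, Stape, Rtape]
  | succ f ih =>
    intro a b c d h
    rw [show fnLoop (f + 1) (Stape a b c d) =
        (if PySem.Chars.isIn ['>', '1'] (Stape a b c d)
            || PySem.Chars.isIn ['>', '2'] (Stape a b c d)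
            || PySem.Chars.isIn ['>', '3'] (Stape a b c d) then
          fnLoop f (pyReplace1 (pyReplace1 (pyReplace1 (Stape a b c d) ['>', '1'] ['1', '>'])
            ['>', '2'] ['>', '3']) ['>', '3'] ['>', '1', '1'])
        else Stape a b c d) from rfl, cond_marker]
    rcases b with _ | B
    · rcases c with _ | C
      · rcases d with _ | D
        · -- 1^a > : the loop exits
          rw [Rtape_zero]
          simp [Stape, Rtape]
        · -- b = 0, c = 0, d > 0 : '>3' fires
          rw [Rtape_d_succ,
            if_pos (by simp [pref_cons '3' (Rtape 0 0 D), npref_cons _ _ (by decide : ('1':Char) ≠ '3'), npref_cons _ _ (by decide : ('2':Char) ≠ '3')]),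
            rep1_zero, tail23_d,
            ih a 2 0 D (by omega)]
          have : a + 2 + 2 * 0 + 2 * D = a + 0 + 2 * 0 + 2 * (D + 1) := by omega
          rw [this]
      · -- b = 0, c > 0 : '>2' then '>3' fire
        rw [Rtape_c_succ,
          if_pos (by simp [pref_cons '2' (Rtape 0 C d), npref_cons _ _ (by decide : ('1':Char) ≠ '2')]),
          rep1_zero, tail23_c,
          ih a 2 C d (by omega)]
        have : a + 2 + 2 * C + 2 * d = a + 0 + 2 * (C + 1) + 2 * d := by omega
        rw [this]
    · -- b > 0 : '>1' fires, the marker steps over a '1'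
      rw [Rtape_b_succ, if_pos (by simp [pref_cons '1' (Rtape B c d)]), rep1_pos]
      rcases B with _ | B'
      · rcases c with _ | C
        · rcases d with _ | D
          · rw [tail23_0, ih (a + 1) 0 0 0 (by omega)]
          · rw [tail23_d, ih (a + 1) 2 0 D (by omega)]
            have : a + 1 + 2 + 2 * 0 + 2 * D = a + 1 + 2 * 0 + 2 * (D + 1) := by omega
            rw [this]
        · rw [tail23_c, ih (a + 1) 2 C d (by omega)]
          have : a + 1 + 2 + 2 * C + 2 * d = a + 1 + 2 * (C + 1) + 2 * d := by omega
          rw [this]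
      · rw [tail23_b, ih (a + 1) (B' + 1) c d (by omega)]
        have : a + 1 + (B' + 1) + 2 * c + 2 * d = a + (B' + 1 + 1) + 2 * c + 2 * d := by omega
        rw [this]

theorem fn_eq_closed (n : Int) : fn n = fn_alt n := by
  unfold fn fn_alt
  have h0 : ('>' :: (List.replicate 23 '1' ++ List.replicate n.toNat '2'
      ++ List.replicate 25 '3')) = Stape 0 23 n.toNat 25 := by
    simp [Stape, Rtape]
  rw [h0, loop_S (3 * n.toNat + 200) 0 23 n.toNat 25 (by omega)]
  have hk : 0 + 23 + 2 * n.toNat + 2 * 25 = (73 + 2 * max n 0).toNat := by omega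
  rw [hk]

-- ===== VERDICT (by name: the statement is the Claim_ definition above) =====
theorem fn_spec : Claim_equal_fn := by
  intro n _
  exact fn_eq_closed n
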